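-- pv_equiv track=rewrite | github.com/sudo-odner/MoIP | lab2/app.py | lfsr_bitwise
-- ===== SOURCE A (Python) =====
-- def lfsr_bitwise(seed, taps, length):
--     state = seed
--     sequence = []
--     for _ in range(length):
--         sequence.append(state & 0xFF)
--         new_bit = 0
--         for tap in taps:
--             new_bit ^= (state >> tap) & 1
--         state = ((state << 1) | new_bit) & 0xFF # Последние 8 бит результата
--     return sequence
-- ===== SOURCE B (Python) =====
-- def lfsr_bitwise(seed, taps, length):
--     if length <= 0:
--         return []
--
--     def step(s):
--         fb = 0
--         for t in taps:
--             fb ^= (s >> t) & 1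
--         return ((s << 1) | fb) & 0xFF
--
--     # After the first transition the state always lies in 0..255, so all later
--     # transitions can be table lookups instead of re-scanning the taps.
--     table = [step(s) for s in range(256)]
--     out = [seed & 0xFF]
--     s = step(seed)  # first transition from the raw seed (may exceed 8 bits)
--     for _ in range(length - 1):
--         out.append(s)
--         s = table[s]
--     return out
-- ===== Notes on version B (the rewrite author's own statement) =====
-- stated objective: faster
-- what changed: B precomputes a 256-entry transition table once (one taps scan per table entry) and then generates the sequence with O(1) table lookups per output byte, instead of A's inner taps loop on every step.
import Mathlib
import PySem

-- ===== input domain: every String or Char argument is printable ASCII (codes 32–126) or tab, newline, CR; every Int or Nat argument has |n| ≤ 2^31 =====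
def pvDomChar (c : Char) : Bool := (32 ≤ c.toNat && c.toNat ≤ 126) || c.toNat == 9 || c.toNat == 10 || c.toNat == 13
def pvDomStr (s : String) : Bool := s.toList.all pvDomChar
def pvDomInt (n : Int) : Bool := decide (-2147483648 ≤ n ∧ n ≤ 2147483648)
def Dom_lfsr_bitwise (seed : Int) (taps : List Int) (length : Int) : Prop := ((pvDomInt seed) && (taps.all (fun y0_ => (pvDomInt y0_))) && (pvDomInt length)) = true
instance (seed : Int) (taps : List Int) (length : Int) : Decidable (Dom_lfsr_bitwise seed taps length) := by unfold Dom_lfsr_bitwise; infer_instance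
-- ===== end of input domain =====

-- B replaces A's per-step taps scan by a precomputed 256-entry transition table (faster main loop).

-- ===== PORT A =====
def lfsr_bitwise (seed : Int) (taps : List Int) (length : Int) : List Int :=
  ((PySem.List.pyRange 0 length 1).foldl
    (fun (acc : Int × List Int) _ =>
      let state := acc.1
      let sequence := acc.2 ++ [PySem.Int.band state 255]
      let new_bit := taps.foldl
        (fun nb tap => PySem.Int.bxor nb (PySem.Int.band (state >>> tap.toNat) 1)) 0
      (PySem.Int.band (PySem.Int.bor (state <<< 1) new_bit) 255, sequence))
    (seed, [])).2

-- ===== PORT B =====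
-- B's helper `step`
def lfsrStep (taps : List Int) (s : Int) : Int :=
  PySem.Int.band (PySem.Int.bor (s <<< 1)
    (taps.foldl (fun fb t => PySem.Int.bxor fb (PySem.Int.band (s >>> t.toNat) 1)) 0)) 255

-- `table[s]` is ported as pyGetD with default 0; every looked-up state lies in 0..255, so the
-- default is never used (exact on all reachable indices).
def lfsr_bitwise_alt (seed : Int) (taps : List Int) (length : Int) : List Int :=
  if length ≤ 0 then []
  else
    let table := (PySem.List.pyRange 0 256 1).map (fun s => lfsrStep taps s)
    ((PySem.List.pyRange 0 (length - 1) 1).foldl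
      (fun (acc : List Int × Int) _ =>
        (acc.1 ++ [acc.2], PySem.List.pyGetD table acc.2 0))
      ([PySem.Int.band seed 255], lfsrStep taps seed)).1

-- ===== PRECONDITION & SPEC =====
-- Pre_ excludes exactly the inputs where Python A raises: a negative tap shift (ValueError)
-- is executed iff length > 0 and some tap is negative.
def Pre_lfsr_bitwise (seed : Int) (taps : List Int) (length : Int) : Prop :=
  0 < length → ∀ t ∈ taps, 0 ≤ t
instance (seed : Int) (taps : List Int) (length : Int) : Decidable (Pre_lfsr_bitwise seed taps length) := by unfold Pre_lfsr_bitwise; infer_instance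

def pvWitness_lfsr_bitwise : Int × List Int × Int := (1, ([0, 3], 5))

def Spec_lfsr_bitwise (seed : Int) (taps : List Int) (length : Int) (out : List Int) : Prop := out = lfsr_bitwise_alt seed taps length
instance (seed : Int) (taps : List Int) (length : Int) (out : List Int) : Decidable (Spec_lfsr_bitwise seed taps length out) := by unfold Spec_lfsr_bitwise; infer_instance

-- ===== CLAIM (what is proved, stated in full; the proofs are below) =====
def Claim_equal_lfsr_bitwise : Prop := ∀ (seed : Int) (taps : List Int) (length : Int), Dom_lfsr_bitwise seed taps length → Pre_lfsr_bitwise seed taps length → Spec_lfsr_bitwise seed taps length (lfsr_bitwise seed taps length)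

-- ===== LEMMAS AND PROOFS =====

-- canonical sequence: n output bytes starting from state s
def seqAux (taps : List Int) : Nat → Int → List Int
  | 0, _ => []
  | n + 1, s => PySem.Int.band s 255 :: seqAux taps n (lfsrStep taps s)

theorem band255_nonneg (a : Int) : 0 ≤ PySem.Int.band a 255 := by
  unfold PySem.Int.band
  split_ifs <;> simp_all

theorem band255_lt (a : Int) : PySem.Int.band a 255 < 256 := by
  unfold PySem.Int.band
  split_ifs with h1 h2 <;> norm_num [show ((255:Int).toNat) = 255 from rfl] at *
  · have := Nat.and_le_right (n := a.toNat) (m := 255); omega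
  · have := Nat.and_le_right (n := 255) (m := (-a - 1).toNat); omega

theorem band255_small {s : Int} (h0 : 0 ≤ s) (h1 : s < 256) : PySem.Int.band s 255 = s := by
  rw [PySem.Int.band_of_nonneg h0 (by norm_num)]
  simp only [show ((255:Int).toNat) = 255 from rfl]
  have h255 : (255 : Nat) = 2 ^ 8 - 1 := by norm_num
  rw [h255, Nat.and_two_pow_sub_one_eq_mod, Nat.mod_eq_of_lt (by omega), Int.toNat_of_nonneg h0]

theorem lfsrStep_nonneg (taps : List Int) (s : Int) : 0 ≤ lfsrStep taps s :=
  band255_nonneg _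

theorem lfsrStep_lt (taps : List Int) (s : Int) : lfsrStep taps s < 256 :=
  band255_lt _

theorem foldA (taps : List Int) : ∀ (l : List Int) (s : Int) (pref : List Int),
    ((l.foldl
      (fun (acc : Int × List Int) _ =>
        let state := acc.1
        let sequence := acc.2 ++ [PySem.Int.band state 255]
        let new_bit := taps.foldl
          (fun nb tap => PySem.Int.bxor nb (PySem.Int.band (state >>> tap.toNat) 1)) 0
        (PySem.Int.band (PySem.Int.bor (state <<< 1) new_bit) 255, sequence))
      (s, pref)).2) = pref ++ seqAux taps l.length s := by
  intro l
  induction l with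
  | nil => intro s pref; simp [seqAux]
  | cons x xs ih =>
      intro s pref
      simp only [List.foldl_cons, List.length_cons]
      rw [ih]
      simp [seqAux, lfsrStep]

theorem foldB (taps : List Int) : ∀ (l : List Int) (s : Int) (pref : List Int),
    0 ≤ s → s < 256 →
    ((l.foldl
      (fun (acc : List Int × Int) _ =>
        (acc.1 ++ [acc.2],
          PySem.List.pyGetD ((PySem.List.pyRange 0 256 1).map (fun t => lfsrStep taps t)) acc.2 0))
      (pref, s)).1) = pref ++ seqAux taps l.length s := by
  intro l
  induction l with
  | nil => intro s pref _ _; simp [seqAux]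
  | cons x xs ih =>
      intro s pref h0 h1
      simp only [List.foldl_cons, List.length_cons]
      rw [PySem.List.pyGetD_map_pyRange_of_nonneg _ 256 s 0 h0 h1]
      rw [ih _ _ (lfsrStep_nonneg taps s) (lfsrStep_lt taps s)]
      simp [seqAux, band255_small h0 h1]

-- ===== VERDICT (by name: the statement is the Claim_ definition above) =====
theorem lfsr_bitwise_spec : Claim_equal_lfsr_bitwise := by
  intro seed taps length _ _
  simp only [Spec_lfsr_bitwise, lfsr_bitwise, lfsr_bitwise_alt]
  by_cases hlen : length ≤ 0
  · rw [PySem.List.pyRange_one_eq_nil (by omega)]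
    simp [hlen]
  · rw [if_neg hlen]
    rw [foldA, foldB taps _ _ _ (lfsrStep_nonneg taps seed) (lfsrStep_lt taps seed)]
    have hN : (PySem.List.pyRange 0 length 1).length =
        (PySem.List.pyRange 0 (length - 1) 1).length + 1 := by
      rw [PySem.List.length_pyRange_one, PySem.List.length_pyRange_one]
      omega
    rw [hN]
    simp [seqAux]
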